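-- pv_equiv track=rewrite | github.com/dengkliu/algorithms | backpack_X.py | backPackX
-- ===== SOURCE A (Python) =====
-- def backPackX(n):
--     prices = [150, 250, 300]
--
--     dp = [[0 for _ in range(n + 1)] for _ in range(4)]
--
--     for i in range(1, 4):
--         for j in range(1, n + 1):
--             dp[i][j] = dp[i-1][j]
--             if (j >= prices[i - 1]):
--                 dp[i][j] = max(dp[i][j], dp[i][j - prices[i-1]] + prices[i-1])
--
--     return n - dp[3][n]
-- ===== SOURCE B (Python) =====
-- def backPackX(n):
--     # O(1) closed form: amounts reachable with 150/250/300 are 50 * (numerical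
--     # semigroup generated by 3 and 5); every q = n//50 >= 8 is reachable, the
--     # few smaller quotients are a fixed table.
--     q, r = divmod(n, 50)
--     if q >= 8:
--         return r
--     small = [0, 0, 0, 3, 3, 5, 6, 6]
--     return n - 50 * small[q]
-- ===== Notes on version B (the rewrite author's own statement) =====
-- stated objective: faster
-- what changed: Replaces the 4x(n+1) unbounded-knapsack DP table with an O(1) closed form: reachable amounts are 50 times the numerical semigroup generated by 3 and 5 (300 is redundant), so the leftover is n%50 once n//50 >= 8, with an 8-entry table for smaller quotients.
import Mathlib
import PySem

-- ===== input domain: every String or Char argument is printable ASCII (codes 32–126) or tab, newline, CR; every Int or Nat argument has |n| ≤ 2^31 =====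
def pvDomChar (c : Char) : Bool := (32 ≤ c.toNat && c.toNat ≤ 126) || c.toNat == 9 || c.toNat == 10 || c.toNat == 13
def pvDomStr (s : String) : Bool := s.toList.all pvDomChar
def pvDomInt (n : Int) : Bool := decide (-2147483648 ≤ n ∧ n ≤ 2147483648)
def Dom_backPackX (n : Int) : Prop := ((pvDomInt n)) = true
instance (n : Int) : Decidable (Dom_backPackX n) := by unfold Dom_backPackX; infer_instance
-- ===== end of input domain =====

-- B replaces A's O(n) unbounded-knapsack DP table by an O(1) closed form
-- (multiples of 50 in the numerical semigroup generated by 3 and 5).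

-- ===== PORT A =====
-- body of A's inner loop: dp[i][j] = dp[i-1][j]; if j >= prices[i-1]: dp[i][j] = max(...)
def innerStep (prices : List Int) (i : Int) (dp : List (List Int)) (j : Int) : List (List Int) :=
  let p := PySem.List.pyGetD prices (i - 1) 0
  let v := PySem.List.pyGetD (PySem.List.pyGetD dp (i - 1) []) j 0
  let v := if p ≤ j then
      max v (PySem.List.pyGetD (PySem.List.pyGetD dp i []) (j - p) 0 + p)
    else v
  PySem.List.pySetD dp i (PySem.List.pySetD (PySem.List.pyGetD dp i []) j v)

def backPackX (n : Int) : Int :=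
  let prices : List Int := [150, 250, 300]
  let dp0 : List (List Int) :=
    (PySem.List.pyRange 0 4 1).map (fun _ =>
      (PySem.List.pyRange 0 (n + 1) 1).map (fun _ => (0 : Int)))
  let dp := (PySem.List.pyRange 1 4 1).foldl (fun dp i =>
    (PySem.List.pyRange 1 (n + 1) 1).foldl (innerStep prices i) dp) dp0
  n - PySem.List.pyGetD (PySem.List.pyGetD dp 3 []) n 0

-- ===== PORT B =====
def backPackX_alt (n : Int) : Int :=
  let q := PySem.Int.floordiv n 50
  let r := PySem.Int.mod n 50
  if 8 ≤ q then r
  else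
    let small : List Int := [0, 0, 0, 3, 3, 5, 6, 6]
    n - 50 * PySem.List.pyGetD small q 0

-- ===== PRECONDITION & SPEC =====
-- Pre_ excludes exactly n < 0, where the dp rows are empty lists and A raises IndexError.
def Pre_backPackX (n : Int) : Prop := 0 ≤ n
instance (n : Int) : Decidable (Pre_backPackX n) := by unfold Pre_backPackX; infer_instance
def pvWitness_backPackX : Int := 500

def Spec_backPackX (n : Int) (out : Int) : Prop := out = backPackX_alt n
instance (n : Int) (out : Int) : Decidable (Spec_backPackX n out) := by unfold Spec_backPackX; infer_instance

-- ===== CLAIM (what is proved, stated in full; the proofs are below) =====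
def Claim_equal_backPackX : Prop := ∀ (n : Int), Dom_backPackX n → Pre_backPackX n → Spec_backPackX n (backPackX n)

-- ===== LEMMAS AND PROOFS =====

-- the value dp[i][j] of one DP row as a recursion: G p f j, where f is the previous row
def G (p : Nat) (f : Nat → Int) : Nat → Int
  | j => if _h : 0 < p ∧ p ≤ j then max (f j) (G p f (j - p) + p) else f j
  termination_by j => j
  decreasing_by omega

theorem G_pos (p : Nat) (f : Nat → Int) (j : Nat) (h : 0 < p ∧ p ≤ j) :
    G p f j = max (f j) (G p f (j - p) + p) := by
  rw [G]; simp [h]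

theorem G_neg (p : Nat) (f : Nat → Int) (j : Nat) (h : ¬ (0 < p ∧ p ≤ j)) :
    G p f j = f j := by
  rw [G]; simp only [h, dite_false]

def zf : Nat → Int := fun _ => 0
def g1 : Nat → Int := G 150 zf
def g2 : Nat → Int := G 250 g1
def g3 : Nat → Int := G 300 g2

-- largest element of the numerical semigroup ⟨3,5⟩ that is ≤ m
def S (m : Nat) : Nat :=
  if 8 ≤ m then m else if m ≤ 2 then 0 else if m ≤ 4 then 3 else if m = 5 then 5 else 6

theorem g1_eq (j : Nat) : g1 j = ((150 * (j / 150) : Nat) : Int) := by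
  induction j using Nat.strong_induction_on with
  | _ j ih =>
    by_cases h : 150 ≤ j
    · rw [g1, G_pos _ _ _ ⟨by norm_num, h⟩]
      have hrec : G 150 zf (j - 150) = ((150 * ((j - 150) / 150) : Nat) : Int) :=
        ih (j - 150) (by omega)
      rw [hrec]
      show max (zf j) _ = _
      simp only [zf]
      rw [max_eq_right (by push_cast; omega)]
      push_cast
      omega
    · rw [g1, G_neg _ _ _ (by omega)]
      simp only [zf]
      have : j / 150 = 0 := by omega
      simp [this]

theorem g2_eq (j : Nat) : g2 j = ((50 * S (j / 50) : Nat) : Int) := by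
  induction j using Nat.strong_induction_on with
  | _ j ih =>
    by_cases h : 250 ≤ j
    · rw [g2, G_pos _ _ _ ⟨by norm_num, h⟩]
      have hrec : G 250 g1 (j - 250) = g2 (j - 250) := rfl
      rw [hrec, ih (j - 250) (by omega)]
      show max (g1 j) _ = _
      rw [g1_eq]
      simp only [S]
      split_ifs <;> push_cast <;> omega
    · rw [g2, G_neg _ _ _ (by omega)]
      show g1 j = _
      rw [g1_eq]
      simp only [S]
      split_ifs <;> push_cast <;> omega

theorem g3_eq (j : Nat) : g3 j = g2 j := by
  induction j using Nat.strong_induction_on with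
  | _ j ih =>
    by_cases h : 300 ≤ j
    · rw [g3, G_pos _ _ _ ⟨by norm_num, h⟩]
      have hrec : G 300 g2 (j - 300) = g3 (j - 300) := rfl
      rw [hrec, ih (j - 300) (by omega)]
      rw [max_eq_left]
      rw [g2_eq, g2_eq]
      simp only [S]
      split_ifs <;> push_cast <;> omega
    · rw [g3, G_neg _ _ _ (by omega)]

-- the inner loop of row i, acting on the row list only
def rowStep (prev : List Int) (p : Int) (cur : List Int) (j : Int) : List Int :=
  let v := PySem.List.pyGetD prev j 0
  let v := if p ≤ j then max v (PySem.List.pyGetD cur (j - p) 0 + p) else v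
  PySem.List.pySetD cur j v

theorem innerStep_1 (a b c d : List Int) (j : Int) :
    innerStep [150, 250, 300] 1 [a, b, c, d] j = [a, rowStep a 150 b j, c, d] := by
  simp [innerStep, rowStep, PySem.List.pyGetD, PySem.List.pyGet?, PySem.List.pySetD,
    PySem.List.pySet?, PySem.List.pyIdx?]

theorem innerStep_2 (a b c d : List Int) (j : Int) :
    innerStep [150, 250, 300] 2 [a, b, c, d] j = [a, b, rowStep b 250 c j, d] := by
  simp [innerStep, rowStep, PySem.List.pyGetD, PySem.List.pyGet?, PySem.List.pySetD,
    PySem.List.pySet?, PySem.List.pyIdx?]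

theorem innerStep_3 (a b c d : List Int) (j : Int) :
    innerStep [150, 250, 300] 3 [a, b, c, d] j = [a, b, c, rowStep c 300 d j] := by
  simp [innerStep, rowStep, PySem.List.pyGetD, PySem.List.pyGet?, PySem.List.pySetD,
    PySem.List.pySet?, PySem.List.pyIdx?]

theorem foldl_inner_1 (l : List Int) (a b c d : List Int) :
    l.foldl (innerStep [150, 250, 300] 1) [a, b, c, d]
      = [a, l.foldl (rowStep a 150) b, c, d] := by
  induction l generalizing b with
  | nil => rfl
  | cons x t ihx => rw [List.foldl_cons, innerStep_1, List.foldl_cons, ihx]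

theorem foldl_inner_2 (l : List Int) (a b c d : List Int) :
    l.foldl (innerStep [150, 250, 300] 2) [a, b, c, d]
      = [a, b, l.foldl (rowStep b 250) c, d] := by
  induction l generalizing c with
  | nil => rfl
  | cons x t ihx => rw [List.foldl_cons, innerStep_2, List.foldl_cons, ihx]

theorem foldl_inner_3 (l : List Int) (a b c d : List Int) :
    l.foldl (innerStep [150, 250, 300] 3) [a, b, c, d]
      = [a, b, c, l.foldl (rowStep c 300) d] := by
  induction l generalizing d with
  | nil => rfl
  | cons x t ihx => rw [List.foldl_cons, innerStep_3, List.foldl_cons, ihx]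

-- the row invariant: folding the inner loop over range(1, k+1) fills entries 1..k with G
theorem row_fold (P : Nat) (hp : 0 < P) (f : Nat → Int) (hf0 : f 0 = 0)
    (N : Nat) (prev : List Int) (hlen : prev.length = N + 1)
    (hprev : ∀ t : Nat, t ≤ N → prev.getD t 0 = f t)
    (k : Nat) (hk : k ≤ N) :
    ((PySem.List.pyRange 1 ((k : Int) + 1) 1).foldl (rowStep prev (P : Int))
        (List.replicate (N + 1) (0 : Int))).length = N + 1 ∧
    ∀ t : Nat, t ≤ N →
      ((PySem.List.pyRange 1 ((k : Int) + 1) 1).foldl (rowStep prev (P : Int))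
        (List.replicate (N + 1) (0 : Int))).getD t 0 = if t ≤ k then G P f t else 0 := by
  induction k with
  | zero =>
    rw [PySem.List.pyRange_one_eq_nil (by norm_num)]
    constructor
    · simp
    · intro t ht
      rw [List.foldl_nil]
      have hz : (List.replicate (N + 1) (0 : Int)).getD t 0 = 0 := by
        simp [List.getD_eq_getElem?_getD, show t < N + 1 by omega]
      rw [hz]
      by_cases h0 : t = 0
      · subst h0
        rw [if_pos (by omega), G_neg _ _ _ (by omega), hf0]
      · rw [if_neg (by omega)]
  | succ k ihk =>
    have hkN : k ≤ N := by omega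
    obtain ⟨ihlen, ihval⟩ := ihk hkN
    set R := (PySem.List.pyRange 1 ((k : Int) + 1) 1).foldl (rowStep prev (P : Int))
      (List.replicate (N + 1) (0 : Int)) with hR
    have hc : ((k + 1 : Nat) : Int) = (k : Int) + 1 := by push_cast; ring
    have hsplit : PySem.List.pyRange 1 (((k + 1 : Nat) : Int) + 1) 1
        = PySem.List.pyRange 1 ((k : Int) + 1) 1 ++ [(k : Int) + 1] := by
      rw [hc]; exact PySem.List.pyRange_one_succ_right (by omega)
    rw [hsplit, List.foldl_append, List.foldl_cons, List.foldl_nil, ← hR]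
    have hget_prev : PySem.List.pyGetD prev ((k : Int) + 1) 0 = f (k + 1) := by
      rw [← hc, PySem.List.pyGetD_natCast, hprev (k + 1) (by omega)]
    have main : ∀ v : Int, v = G P f (k + 1) →
        (R.set (k + 1) v).length = N + 1 ∧
        ∀ t : Nat, t ≤ N → (R.set (k + 1) v).getD t 0 = if t ≤ k + 1 then G P f t else 0 := by
      intro v hv
      refine ⟨by rw [List.length_set, ihlen], ?_⟩
      intro t ht
      by_cases htk : t = k + 1
      · subst htk
        rw [List.getD_eq_getElem?_getD, List.getElem?_set_self (by rw [ihlen]; omega)]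
        simp [hv]
      · rw [List.getD_eq_getElem?_getD, List.getElem?_set_ne (by omega),
          ← List.getD_eq_getElem?_getD, ihval t ht]
        by_cases h2 : t ≤ k
        · rw [if_pos h2, if_pos (by omega)]
        · rw [if_neg h2, if_neg (by omega)]
    simp only [rowStep, hget_prev]
    by_cases hP : P ≤ k + 1
    · have hgetR : PySem.List.pyGetD R ((k : Int) + 1 - (P : Int)) 0 = G P f (k + 1 - P) := by
        have hc2 : (k : Int) + 1 - (P : Int) = ((k + 1 - P : Nat) : Int) := by omega
        rw [hc2, PySem.List.pyGetD_natCast, ihval (k + 1 - P) (by omega), if_pos (by omega)]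
      rw [if_pos (by omega : (P : Int) ≤ (k : Int) + 1), hgetR, ← hc, PySem.List.pySetD_natCast]
      exact main _ (by rw [G_pos P f (k + 1) ⟨hp, hP⟩])
    · rw [if_neg (by omega : ¬ (P : Int) ≤ (k : Int) + 1), ← hc, PySem.List.pySetD_natCast]
      exact main _ (by rw [G_neg P f (k + 1) (by omega)])

theorem g1_zero : g1 0 = 0 := by rw [g1, G_neg _ _ _ (by omega)]; rfl

theorem g2_zero : g2 0 = 0 := by rw [g2, G_neg _ _ _ (by omega)]; exact g1_zero

theorem pyGetD_fin4 {A : Type} (a b c d : A) (e : A) :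
    PySem.List.pyGetD [a, b, c, d] 3 e = d := by
  simp [PySem.List.pyGetD, PySem.List.pyGet?, PySem.List.pyIdx?]

-- A computes N - g3 N
theorem backPackX_eq (N : Nat) : backPackX (N : Int) = (N : Int) - g3 N := by
  have hzrep : (PySem.List.pyRange 0 ((N : Int) + 1) 1).map (fun _ => (0 : Int))
      = List.replicate (N + 1) 0 := by
    rw [List.map_const']
    congr 1
    rw [PySem.List.length_pyRange_one]
    omega
  have hzget : ∀ t : Nat, t ≤ N → (List.replicate (N + 1) (0 : Int)).getD t 0 = 0 := by
    intro t ht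
    simp [List.getD_eq_getElem?_getD, show t < N + 1 by omega]
  simp only [backPackX]
  rw [show PySem.List.pyRange 1 4 1 = ([1, 2, 3] : List Int) from by decide,
      show PySem.List.pyRange 0 4 1 = ([0, 1, 2, 3] : List Int) from by decide]
  simp only [List.map, List.foldl_cons, List.foldl_nil]
  rw [hzrep, foldl_inner_1]
  -- row 1
  obtain ⟨hlen1, hval1⟩ := row_fold 150 (by norm_num) zf rfl N
    (List.replicate (N + 1) 0) (by simp) hzget N le_rfl
  norm_num at hlen1 hval1
  rw [foldl_inner_2]
  -- row 2
  obtain ⟨hlen2, hval2⟩ := row_fold 250 (by norm_num) g1 g1_zero N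
    ((PySem.List.pyRange 1 ((N : Int) + 1) 1).foldl (rowStep (List.replicate (N + 1) 0) 150)
      (List.replicate (N + 1) 0)) hlen1
    (by intro t ht; rw [List.getD_eq_getElem?_getD, hval1 t ht, if_pos ht]; rfl) N le_rfl
  norm_num at hlen2 hval2
  rw [foldl_inner_3]
  -- row 3
  obtain ⟨hlen3, hval3⟩ := row_fold 300 (by norm_num) g2 g2_zero N
    ((PySem.List.pyRange 1 ((N : Int) + 1) 1).foldl
      (rowStep ((PySem.List.pyRange 1 ((N : Int) + 1) 1).foldl
        (rowStep (List.replicate (N + 1) 0) 150) (List.replicate (N + 1) 0)) 250)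
      (List.replicate (N + 1) 0)) hlen2
    (by intro t ht; rw [List.getD_eq_getElem?_getD, hval2 t ht, if_pos ht]; rfl) N le_rfl
  norm_num at hlen3 hval3
  rw [pyGetD_fin4, PySem.List.pyGetD_natCast, List.getD_eq_getElem?_getD,
      hval3 N le_rfl, if_pos le_rfl]
  rfl

-- B computes the same closed form
theorem backPackX_alt_eq (N : Nat) : backPackX_alt (N : Int) = (N : Int) - g3 N := by
  rw [g3_eq, g2_eq]
  simp only [backPackX_alt]
  rw [PySem.Int.floordiv_eq_ediv_of_pos (by norm_num), PySem.Int.mod_eq_emod_of_pos (by norm_num)]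
  by_cases hm : 8 ≤ N / 50
  · rw [if_pos (by omega)]
    rw [S, if_pos hm]
    omega
  · rw [if_neg (by omega)]
    have hc : (N : Int) / 50 = ((N / 50 : Nat) : Int) := by omega
    rw [hc, PySem.List.pyGetD_natCast]
    have h8 : N / 50 < 8 := by omega
    generalize N / 50 = m at h8 ⊢
    interval_cases m <;> simp [S, List.getD]

-- ===== VERDICT (by name: the statement is the Claim_ definition above) =====
theorem backPackX_spec : Claim_equal_backPackX := by
  intro n _hdom hpre
  unfold Spec_backPackX
  obtain ⟨N, rfl⟩ : ∃ N : Nat, n = (N : Int) := ⟨n.toNat, (Int.toNat_of_nonneg hpre).symm⟩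
  rw [backPackX_eq, backPackX_alt_eq]
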